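-- pv_equiv track=rewrite | github.com/sylvester152535/Root- | Root.py | duplicity
-- ===== SOURCE A (Python) =====
-- def duplicity(driverNames):
--     duplicateIndex = []
--     for i in range(len(driverNames)):
--         for j in range(i+1, len(driverNames)):
--             if driverNames[i] == driverNames[j]:
--                 duplicateIndex.append(i)
--                 duplicateIndex.append(j)
--                 return duplicateIndex
-- ===== SOURCE B (Python) =====
-- def duplicity(driverNames):
--     # Count every value once; then a single scan finds the first position whose
--     # value is duplicated; its partner is the next occurrence of that value.
--     counts = {}
--     for v in driverNames:
--         counts[v] = counts.get(v, 0) + 1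
--     for i, v in enumerate(driverNames):
--         if counts[v] > 1:
--             return [i, i + 1 + driverNames[i + 1:].index(v)]
--     return None
-- ===== Notes on version B (the rewrite author's own statement) =====
-- stated objective: alternative
-- what changed: Replaced the nested index loops (for each i, scan the rest for a match) by one counting pass over the list (dict value->count) followed by a single scan that returns at the first position whose value is duplicated, with one index() call to find its partner; B's worst case is linear but it always reads the whole list, so it is not measurably faster on random inputs where A exits early.
import Mathlib
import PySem

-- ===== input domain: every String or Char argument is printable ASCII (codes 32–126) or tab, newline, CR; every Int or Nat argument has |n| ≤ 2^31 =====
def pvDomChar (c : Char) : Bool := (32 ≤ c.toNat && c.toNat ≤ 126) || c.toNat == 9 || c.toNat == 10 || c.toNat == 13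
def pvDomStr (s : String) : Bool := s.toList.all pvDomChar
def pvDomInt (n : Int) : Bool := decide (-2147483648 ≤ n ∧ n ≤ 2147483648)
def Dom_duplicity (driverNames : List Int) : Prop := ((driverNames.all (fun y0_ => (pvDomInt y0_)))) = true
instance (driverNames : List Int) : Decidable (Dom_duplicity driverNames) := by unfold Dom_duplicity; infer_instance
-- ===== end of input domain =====

-- B replaces A's nested index loops by one counting pass (value -> count) plus one
-- scan returning at the first position whose value is duplicated (same return value).

-- ===== PORT A =====
-- inner loop: 'for j in range(i+1, len(driverNames)): if driverNames[i] == driverNames[j]: return [i, j]'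
-- (indices drawn from range are always in bounds, so xs[i] is ported as getD with an unreachable default)
def dupInnerA (xs : List Int) (i : Nat) : List Nat → Option (List Int)
  | [] => none
  | j :: js =>
      if xs.getD i 0 = xs.getD j 0 then some [(i : Int), (j : Int)]
      else dupInnerA xs i js

-- outer loop: 'for i in range(len(driverNames)): …' with early return
def dupOuterA (xs : List Int) : List Nat → Option (List Int)
  | [] => none
  | i :: is =>
      match dupInnerA xs i (List.range' (i + 1) (xs.length - (i + 1))) with
      | some r => some r
      | none => dupOuterA xs is

def duplicity (driverNames : List Int) : Option (List Int) :=
  dupOuterA driverNames (List.range driverNames.length)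

-- ===== PORT B =====
-- 'counts[v] = counts.get(v, 0) + 1' over the whole list
def dupCountsB (xs : List Int) : PySem.Dict Int Int :=
  xs.foldl (fun d v => d.modify v 0 (· + 1)) PySem.Dict.empty

-- 'for i, v in enumerate(driverNames): if counts[v] > 1: return [i, i+1+driverNames[i+1:].index(v)]'
-- (.index never raises at the first position with count > 1, so its port's default 0 is unreachable)
def dupScanB (full : List Int) (counts : PySem.Dict Int Int) : List (Int × Int) → Option (List Int)
  | [] => none
  | (i, v) :: rest =>
      if 1 < counts.getD v 0 then
        some [i, i + 1 + (((PySem.List.index? (PySem.List.slice full (some (i + 1)) none) v).getD 0 : Nat) : Int)]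
      else dupScanB full counts rest

def duplicity_alt (driverNames : List Int) : Option (List Int) :=
  dupScanB driverNames (dupCountsB driverNames) (PySem.List.enumerate driverNames 0)

-- ===== PRECONDITION & SPEC =====
def Spec_duplicity (driverNames : List Int) (out : Option (List Int)) : Prop := out = duplicity_alt driverNames
instance (driverNames : List Int) (out : Option (List Int)) : Decidable (Spec_duplicity driverNames out) := by unfold Spec_duplicity; infer_instance

-- ===== CLAIM (what is proved, stated in full; the proofs are below) =====
def Claim_equal_duplicity : Prop := ∀ (driverNames : List Int), Dom_duplicity driverNames → Spec_duplicity driverNames (duplicity driverNames)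

-- ===== LEMMAS AND PROOFS =====

-- B's counter dict reads back as List.count
theorem dupCountsB_getD (xs : List Int) (v : Int) :
    (dupCountsB xs).getD v 0 = (xs.count v : Int) := by
  simpa [dupCountsB] using PySem.Dict.getD_foldl_modify_add_one xs PySem.Dict.empty v

-- A's inner loop over range' s m (with s + m = length) is index? on the suffix
theorem dupInnerA_eq (xs : List Int) (i : Nat) :
    ∀ (m s : Nat), s + m = xs.length →
      dupInnerA xs i (List.range' s m) =
        (PySem.List.index? (xs.drop s) (xs.getD i 0)).map
          (fun k => [(i : Int), ((s + k : Nat) : Int)]) := by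
  intro m
  induction m with
  | zero =>
      intro s hs
      have hnil : xs.drop s = [] := List.drop_eq_nil_of_le (by omega)
      have h0 : PySem.List.index? (xs.drop s) (xs.getD i 0) = none :=
        (PySem.List.index?_eq_none_iff _ _).mpr (by rw [hnil]; simp)
      rw [List.range'_zero, h0]
      rfl
  | succ m ih =>
      intro s hs
      have hslt : s < xs.length := by omega
      have hdrop : xs.drop s = xs[s] :: xs.drop (s + 1) := List.drop_eq_getElem_cons hslt
      have hgs : xs.getD s 0 = xs[s] := List.getD_eq_getElem xs 0 hslt
      rw [List.range'_succ, hdrop]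
      simp only [dupInnerA, hgs]
      by_cases hv : xs.getD i 0 = xs[s]
      · rw [if_pos hv, hv, PySem.List.index?_cons_self]
        simp
      · rw [if_neg hv, ih (s + 1) (by omega),
          PySem.List.index?_cons_of_ne _ (fun h => hv h.symm), Option.map_map]
        cases hres : PySem.List.index? (xs.drop (s + 1)) (xs.getD i 0) with
        | none => rfl
        | some k =>
            simp only [Option.map_some, Function.comp_apply]
            have hk : s + 1 + k = s + (k + 1) := by omega
            rw [hk]

-- count of v in xs splits around position k where xs[k] = v
theorem count_split (xs : List Int) (k : Nat) (hk : k < xs.length) (v : Int) (hv : xs[k] = v) :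
    xs.count v = (xs.take k).count v + 1 + (xs.drop (k + 1)).count v := by
  conv_lhs => rw [← List.take_append_drop k xs, List.drop_eq_getElem_cons hk]
  simp [List.count_append, hv]
  omega

-- main induction: both loops agree from position k on, given that every value
-- seen strictly before k occurs exactly once in the whole list
theorem main_eq (full : List Int) :
    ∀ (m k : Nat), k + m = full.length →
      (∀ j, j < k → full.count (full.getD j 0) = 1) →
      dupOuterA full (List.range' k m) =
        dupScanB full (dupCountsB full) (PySem.List.enumerate (full.drop k) k) := by
  intro m
  induction m with
  | zero =>
      intro k hk _
      have hnil : full.drop k = [] := List.drop_eq_nil_of_le (by omega)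
      simp [dupOuterA, dupScanB, hnil]
  | succ m ih =>
      intro k hk hinv
      have hklt : k < full.length := by omega
      have hdrop : full.drop k = full[k] :: full.drop (k + 1) := List.drop_eq_getElem_cons hklt
      set v := full[k] with hv
      have hgetD : full.getD k 0 = v := List.getD_eq_getElem full 0 hklt
      have hcnt := count_split full k hklt v rfl
      rw [List.range'_succ, hdrop, PySem.List.enumerate_cons]
      have hinner := dupInnerA_eq full k (full.length - (k + 1)) (k + 1) (by omega)
      rw [hgetD] at hinner
      have hslice : PySem.List.slice full (some ((k : Int) + 1)) none = full.drop (k + 1) := by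
        have h1 : ((k : Int) + 1) = ((k + 1 : Nat) : Int) := by push_cast; ring
        rw [h1, PySem.List.slice_from_natCast]
      by_cases hbig : 1 < ((dupCountsB full).getD v 0)
      · -- duplicated value: both return here, with the same partner index
        have hcv : 1 < full.count v := by
          have := dupCountsB_getD full v
          omega
        have hmem : v ∈ full.drop (k + 1) := by
          by_contra hnm
          have h0 : (full.drop (k + 1)).count v = 0 := List.count_eq_zero.mpr hnm
          have hpre : 0 < (full.take k).count v := by omega
          have hvmem : v ∈ full.take k := List.count_pos_iff.mp hpre
          obtain ⟨j, hj, hje⟩ := List.mem_iff_getElem.mp hvmem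
          have hjk : j < k := by
            have := hj; simp at this; omega
          have hjlen : j < full.length := by omega
          have hfj : full.getD j 0 = v := by
            rw [List.getD_eq_getElem full 0 hjlen, ← hje, List.getElem_take]
          have := hinv j hjk
          rw [hfj] at this
          omega
        obtain ⟨t, ht⟩ := Option.isSome_iff_exists.mp
          ((PySem.List.index?_isSome_iff _ _).mpr hmem)
        simp only [dupOuterA, hinner, ht, Option.map_some]
        simp only [dupScanB, if_pos hbig, hslice, ht, Option.getD_some]
        have hEq : ((k + 1 + t : Nat) : Int) = (k : Int) + 1 + (t : Int) := by push_cast; ring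
        rw [hEq]
      · -- unique value: both skip to k+1
        have hone : full.count v = 1 := by
          have := dupCountsB_getD full v
          omega
        have hnm : v ∉ full.drop (k + 1) := by
          intro hmem
          have := List.count_pos_iff.mpr hmem
          omega
        have hidx : PySem.List.index? (full.drop (k + 1)) v = none :=
          (PySem.List.index?_eq_none_iff _ _).mpr hnm
        simp only [dupOuterA, hinner, hidx, Option.map_none]
        simp only [dupScanB, if_neg hbig]
        have hrec := ih (k + 1) (by omega) (fun j hj => by
          rcases Nat.lt_succ_iff_lt_or_eq.mp hj with h | h
          · exact hinv j h
          · rw [h, hgetD]; exact hone)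
        rw [show ((k : Int) + 1) = ((k + 1 : Nat) : Int) by push_cast; ring]
        exact hrec

-- ===== VERDICT (by name: the statement is the Claim_ definition above) =====
theorem duplicity_spec : Claim_equal_duplicity := by
  intro xs _
  unfold Spec_duplicity duplicity duplicity_alt
  have h := main_eq xs xs.length 0 (by omega) (fun j hj => absurd hj (Nat.not_lt_zero j))
  simpa [List.range_eq_range'] using h
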